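-- pv_equiv track=rewrite | github.com/lee1613/LeetCode | 1277-count-square-submatrices-with-all-ones/1277-count-square-submatrices-with-all-ones.py | countSquares
-- ===== SOURCE A (Python) =====
-- from typing import List
--
-- def countSquares(matrix: List[List[int]]) -> int:
--     # res = 0
--     # for row in range(len(matrix)):
--     #     for col in range(len(matrix[0])):
--     #         if matrix[row][col] == 1:
--     #             matrix[row][col] == 0
--     #             res += 1
--     #             row_size = 1
--     #             col_size = 1
--     #             while row + size < len(matrix) and col + size < len(matrix[0]):
--     #                 row_expand = True
--     #                 col_expand = True
--     #                 for i in range(size + 1):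
--     #                     if matrix[row + size][col + i] != 1:
--     #                         col_expand = False
--
--     #                 for i in range(size):
--     #                     if matrix[row + i][col + size] != 1:
--     #                         expand = False
--
--     #                 if expand:
--     #                     for i in range(size + 1):
--     #                         if matrix[row + size][col + i] == 1:
--     #                             matrix[row + size][col + i] = 0
--
--     #                     for i in range(size):
--     #                         if matrix[row + i][col + size] == 1:
--     #                             matrix[row + i][col + size] = 0
--
--     #                     res += size * 2 + 1 + size ** 2
--     #                     size += 1
--     #                 else:
--     #                     break
--
--     # return res
--
--     res = 0
--     size = 1
--     while size <= min(len(matrix), len(matrix[0])):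
--         count = 0
--         for row in range(len(matrix) - size + 1):
--             for col in range(len(matrix[0]) - size + 1):
--                 expand = True
--                 for i in range(size):
--                     for j in range(size):
--                         if matrix[row + i][col + j] == 0:
--                             expand = False
--                 if expand:
--                     count += 1
--
--         res += count
--         size += 1
--         if count < 4:
--             break
--
--
--
--     return res
-- ===== SOURCE B (Python) =====
-- from typing import List
--
-- def countSquares(matrix: List[List[int]]) -> int:
--     m, n = len(matrix), len(matrix[0])
--     # Z[i][j] = number of zero cells in the i x j top-left sub-rectangle.
--     Z = [[0] * (n + 1)]
--     for i in range(m):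
--         prev = Z[i]
--         cur = [0]
--         for j in range(n):
--             cur.append(prev[j + 1] + cur[j] - prev[j] + (1 if matrix[i][j] == 0 else 0))
--         Z.append(cur)
--     res = 0
--     size = 1
--     while size <= min(m, n):
--         count = 0
--         for r in range(m - size + 1):
--             for c in range(n - size + 1):
--                 if Z[r + size][c + size] - Z[r][c + size] - Z[r + size][c] + Z[r][c] == 0:
--                     count += 1
--         res += count
--         size += 1
--         if count < 4:
--             break
--     return res
-- ===== Notes on version B (the rewrite author's own statement) =====
-- stated objective: faster
-- what changed: B precomputes a summed-area table of zero counts once, so each candidate square is tested by one O(1) rectangle-sum lookup instead of A's O(size^2) cell-by-cell rescan; the per-size loop with its early stop is kept.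
import Mathlib
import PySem

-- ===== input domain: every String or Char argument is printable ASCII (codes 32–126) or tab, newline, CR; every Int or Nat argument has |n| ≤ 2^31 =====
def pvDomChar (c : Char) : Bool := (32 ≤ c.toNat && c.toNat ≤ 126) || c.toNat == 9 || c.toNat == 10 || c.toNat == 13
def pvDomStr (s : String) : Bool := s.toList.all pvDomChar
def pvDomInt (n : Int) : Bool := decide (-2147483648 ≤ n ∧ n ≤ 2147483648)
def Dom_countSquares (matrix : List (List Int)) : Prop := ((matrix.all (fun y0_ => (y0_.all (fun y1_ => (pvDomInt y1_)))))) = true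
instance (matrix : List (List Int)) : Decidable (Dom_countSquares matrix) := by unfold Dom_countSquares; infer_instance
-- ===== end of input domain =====

-- B builds a summed-area table of zero counts once so each candidate square is
-- tested with one O(1) rectangle lookup instead of A's per-square cell rescan.


-- ===== PORT A =====
-- matrix[row+i][col+j]: indices are in range under Pre_; getD supplies a default outside it
def pyCheckA (matrix : List (List Int)) (row col size : Nat) : Bool :=
  (List.range size).foldl (fun e i =>
    (List.range size).foldl (fun e j =>
      if (matrix.getD (row + i) []).getD (col + j) 0 = 0 then false else e) e) true

def countA_size (matrix : List (List Int)) (m n size : Nat) : Int :=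
  (List.range (m - size + 1)).foldl (fun cnt row =>
    (List.range (n - size + 1)).foldl (fun cnt col =>
      if pyCheckA matrix row col size then cnt + 1 else cnt) cnt) 0

-- the while loop: fuel = min m n + 1 - size (the loop condition is fuel > 0); body in source order
def countA_go (matrix : List (List Int)) (m n : Nat) : Nat → Nat → Int → Int
  | 0, _, res => res
  | fuel + 1, size, res =>
    let count := countA_size matrix m n size
    if count < 4 then res + count
    else countA_go matrix m n fuel (size + 1) (res + count)

def countSquares (matrix : List (List Int)) : Int :=
  countA_go matrix matrix.length (matrix.headD []).length
    (min matrix.length (matrix.headD []).length) 1 0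

-- ===== PORT B =====
-- one prefix row: cur = [0]; cur.append(prev[j+1] + cur[j] - prev[j] + (1 if matrix[i][j]==0 else 0))
def zrowB (prev mrow : List Int) (n : Nat) : List Int :=
  (List.range n).foldl (fun cur j =>
    cur ++ [prev.getD (j + 1) 0 + cur.getD j 0 - prev.getD j 0 +
      (if mrow.getD j 0 = 0 then 1 else 0)]) [0]

-- Z = [[0]*(n+1)]; for i in range(m): Z.append(row built from prev = Z[i] and matrix[i])
def buildZ (matrix : List (List Int)) (m n : Nat) : List (List Int) :=
  (List.range m).foldl (fun Z i => Z ++ [zrowB (Z.getD i []) (matrix.getD i []) n])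
    [List.replicate (n + 1) 0]

-- Z[r+size][c+size] - Z[r][c+size] - Z[r+size][c] + Z[r][c]
def rectZ (Z : List (List Int)) (r c size : Nat) : Int :=
  (Z.getD (r + size) []).getD (c + size) 0 - (Z.getD r []).getD (c + size) 0
    - (Z.getD (r + size) []).getD c 0 + (Z.getD r []).getD c 0

def countB_size (Z : List (List Int)) (m n size : Nat) : Int :=
  (List.range (m - size + 1)).foldl (fun cnt r =>
    (List.range (n - size + 1)).foldl (fun cnt c =>
      if rectZ Z r c size = 0 then cnt + 1 else cnt) cnt) 0

def countB_go (Z : List (List Int)) (m n : Nat) : Nat → Nat → Int → Int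
  | 0, _, res => res
  | fuel + 1, size, res =>
    let count := countB_size Z m n size
    if count < 4 then res + count
    else countB_go Z m n fuel (size + 1) (res + count)

def countSquares_alt (matrix : List (List Int)) : Int :=
  countB_go (buildZ matrix matrix.length (matrix.headD []).length)
    matrix.length (matrix.headD []).length
    (min matrix.length (matrix.headD []).length) 1 0

-- ===== PRECONDITION & SPEC =====
-- Pre_ excludes exactly the inputs where Python A raises IndexError: the empty matrix
-- (matrix[0]) and matrices with a row shorter than row 0 (matrix[row][col] out of range).
def Pre_countSquares (matrix : List (List Int)) : Prop :=
  matrix ≠ [] ∧ ∀ row ∈ matrix, (matrix.headD []).length ≤ row.length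
instance (matrix : List (List Int)) : Decidable (Pre_countSquares matrix) := by
  unfold Pre_countSquares; infer_instance

def pvWitness_countSquares : List (List Int) := [[1, 0], [1, 1]]

def Spec_countSquares (matrix : List (List Int)) (out : Int) : Prop := out = countSquares_alt matrix
instance (matrix : List (List Int)) (out : Int) : Decidable (Spec_countSquares matrix out) := by unfold Spec_countSquares; infer_instance

-- ===== CLAIM (what is proved, stated in full; the proofs are below) =====
def Claim_equal_countSquares : Prop := ∀ (matrix : List (List Int)), Dom_countSquares matrix → Pre_countSquares matrix → Spec_countSquares matrix (countSquares matrix)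

-- ===== LEMMAS AND PROOFS =====

-- 0/1 indicator of a zero cell, its row prefix sums, and the 2D prefix sums
def zInd (matrix : List (List Int)) (i j : Nat) : Int :=
  if (matrix.getD i []).getD j 0 = 0 then 1 else 0

def rowZf (matrix : List (List Int)) (i j : Nat) : Int :=
  ∑ t ∈ Finset.range j, zInd matrix i t

def zcf (matrix : List (List Int)) (i j : Nat) : Int :=
  ∑ k ∈ Finset.range i, rowZf matrix k j

theorem foldl_append_one_length {α : Type} (f : List α → Nat → α) :
    ∀ (l : List Nat) (acc : List α),
      (l.foldl (fun cur j => cur ++ [f cur j]) acc).length = acc.length + l.length := by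
  intro l
  induction l with
  | nil => simp
  | cons a t ih => intro acc; rw [List.foldl_cons, ih]; simp; omega

theorem zrowB_length (prev mrow : List Int) (n : Nat) : (zrowB prev mrow n).length = n + 1 := by
  unfold zrowB
  rw [foldl_append_one_length (fun cur j => prev.getD (j + 1) 0 + cur.getD j 0 - prev.getD j 0 +
      (if mrow.getD j 0 = 0 then 1 else 0))]
  simp [Nat.add_comm]

theorem zrowB_getD (prev mrow : List Int) (n : Nat) :
    ∀ j ≤ n, (zrowB prev mrow n).getD j 0 =
      prev.getD j 0 - prev.getD 0 0 +
        ∑ t ∈ Finset.range j, (if mrow.getD t 0 = 0 then (1 : Int) else 0) := by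
  induction n with
  | zero => intro j hj; interval_cases j; simp [zrowB]
  | succ n ih =>
    intro j hj
    have hstep : zrowB prev mrow (n + 1) = zrowB prev mrow n ++
        [prev.getD (n + 1) 0 + (zrowB prev mrow n).getD n 0 - prev.getD n 0 +
          (if mrow.getD n 0 = 0 then (1 : Int) else 0)] := by
      unfold zrowB; rw [List.range_succ, List.foldl_append]; rfl
    rcases Nat.lt_or_ge j (n + 1) with h | h
    · rw [hstep, List.getD_append _ _ _ _ (by rw [zrowB_length]; omega)]
      exact ih j (by omega)
    · have hj' : j = n + 1 := by omega
      subst hj'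
      rw [hstep, List.getD_append_right _ _ _ _ (by rw [zrowB_length])]
      rw [zrowB_length]
      simp only [Nat.sub_self, List.getD_cons_zero]
      rw [ih n (by omega), Finset.sum_range_succ]
      ring

theorem buildZ_length (matrix : List (List Int)) (m n : Nat) :
    (buildZ matrix m n).length = m + 1 := by
  unfold buildZ
  rw [foldl_append_one_length (fun Z i => zrowB (Z.getD i []) (matrix.getD i []) n)]
  simp [Nat.add_comm]

theorem buildZ_getD (matrix : List (List Int)) (n : Nat) : ∀ (m : Nat),
    ∀ i ≤ m, ∀ j ≤ n, ((buildZ matrix m n).getD i []).getD j 0 = zcf matrix i j := by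
  intro m
  induction m with
  | zero =>
    intro i hi j hj
    interval_cases i
    simp only [buildZ, List.range_zero, List.foldl_nil, List.getD_cons_zero]
    rw [List.getD_replicate _ (by omega)]
    simp [zcf]
  | succ m ih =>
    intro i hi j hj
    have hstep : buildZ matrix (m + 1) n = buildZ matrix m n ++
        [zrowB ((buildZ matrix m n).getD m []) (matrix.getD m []) n] := by
      unfold buildZ; rw [List.range_succ, List.foldl_append]; rfl
    rcases Nat.lt_or_ge i (m + 1) with h | h
    · rw [hstep, List.getD_append _ _ _ _ (by rw [buildZ_length]; omega)]
      exact ih i (by omega) j hj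
    · have hi' : i = m + 1 := by omega
      subst hi'
      rw [hstep, List.getD_append_right _ _ _ _ (by rw [buildZ_length])]
      rw [buildZ_length]
      simp only [Nat.sub_self, List.getD_cons_zero]
      rw [zrowB_getD _ _ _ j hj]
      rw [ih m (by omega) j hj, ih m (by omega) 0 (by omega)]
      have h0 : zcf matrix m 0 = 0 := by simp [zcf, rowZf]
      have hS : ∑ t ∈ Finset.range j, (if (matrix.getD m []).getD t 0 = 0 then (1 : Int) else 0)
          = rowZf matrix m j := by simp [rowZf, zInd]
      rw [h0, hS]
      rw [show zcf matrix (m + 1) j = zcf matrix m j + rowZf matrix m j from by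
        rw [zcf, Finset.sum_range_succ]; rfl]
      rw [zcf]
      ring

theorem rect_eq (matrix : List (List Int)) (m n r c s : Nat)
    (hr : r + s ≤ m) (hc : c + s ≤ n) :
    rectZ (buildZ matrix m n) r c s =
      ∑ i ∈ Finset.range s, ∑ j ∈ Finset.range s, zInd matrix (r + i) (c + j) := by
  have h1 : ∀ j ≤ n, zcf matrix (r + s) j =
      zcf matrix r j + ∑ i ∈ Finset.range s, rowZf matrix (r + i) j := by
    intro j _; rw [zcf, Finset.sum_range_add]; rfl
  have h2 : ∀ k, rowZf matrix k (c + s) =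
      rowZf matrix k c + ∑ j ∈ Finset.range s, zInd matrix k (c + j) := by
    intro k; rw [rowZf, Finset.sum_range_add]; rfl
  unfold rectZ
  rw [buildZ_getD matrix n m (r + s) hr (c + s) hc,
      buildZ_getD matrix n m r (by omega) (c + s) hc,
      buildZ_getD matrix n m (r + s) hr c (by omega),
      buildZ_getD matrix n m r (by omega) c (by omega)]
  rw [h1 (c + s) hc, h1 c (by omega)]
  simp only [h2, Finset.sum_add_distrib]
  ring

theorem foldl_if_false {α : Type} (p : α → Prop) [DecidablePred p] :
    ∀ (l : List α) (e : Bool),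
      l.foldl (fun e x => if p x then false else e) e = (e && l.all (fun x => !decide (p x))) := by
  intro l
  induction l with
  | nil => simp
  | cons a t ih =>
    intro e
    rw [List.foldl_cons, ih]
    by_cases h : p a <;> simp [h]

theorem foldl_and {α : Type} (A : α → Bool) :
    ∀ (l : List α) (e : Bool), l.foldl (fun e x => e && A x) e = (e && l.all A) := by
  intro l
  induction l with
  | nil => simp
  | cons a t ih => intro e; by_cases h : A a <;> simp [h, ih]

theorem check_iff (matrix : List (List Int)) (r c s : Nat) :
    pyCheckA matrix r c s = true ↔
      ∀ i < s, ∀ j < s, (matrix.getD (r + i) []).getD (c + j) 0 ≠ 0 := by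
  unfold pyCheckA
  rw [PySem.List.foldl_congr_mem _ _
      (fun e i => e && (List.range s).all
        (fun j => !decide ((matrix.getD (r + i) []).getD (c + j) 0 = 0))) true
      (by intro acc x _; exact foldl_if_false _ (List.range s) acc)]
  rw [foldl_and]
  simp [List.all_eq_true]

theorem zInd_nonneg (matrix : List (List Int)) (i j : Nat) : 0 ≤ zInd matrix i j := by
  unfold zInd; split <;> norm_num

theorem zInd_eq_zero_iff (matrix : List (List Int)) (i j : Nat) :
    zInd matrix i j = 0 ↔ (matrix.getD i []).getD j 0 ≠ 0 := by
  unfold zInd; split <;> simp_all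

theorem size_eq (matrix : List (List Int)) (m n s : Nat) (hm : s ≤ m) (hn : s ≤ n) :
    countB_size (buildZ matrix m n) m n s = countA_size matrix m n s := by
  unfold countB_size countA_size
  apply PySem.List.foldl_congr_mem
  intro cnt r hr
  apply PySem.List.foldl_congr_mem
  intro cnt c hc
  have hr' : r + s ≤ m := by rw [List.mem_range] at hr; omega
  have hc' : c + s ≤ n := by rw [List.mem_range] at hc; omega
  have hiff : rectZ (buildZ matrix m n) r c s = 0 ↔ pyCheckA matrix r c s = true := by
    rw [rect_eq matrix m n r c s hr' hc', check_iff]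
    rw [Finset.sum_eq_zero_iff_of_nonneg
      (fun i _ => Finset.sum_nonneg (fun j _ => zInd_nonneg matrix (r + i) (c + j)))]
    constructor
    · intro h i hi j hj
      have h2 := (Finset.sum_eq_zero_iff_of_nonneg
        (fun j _ => zInd_nonneg matrix (r + i) (c + j))).mp
        (h i (Finset.mem_range.mpr hi)) j (Finset.mem_range.mpr hj)
      exact (zInd_eq_zero_iff _ _ _).mp h2
    · intro h i hi
      rw [Finset.sum_eq_zero_iff_of_nonneg (fun j _ => zInd_nonneg matrix (r + i) (c + j))]
      intro j hj
      exact (zInd_eq_zero_iff _ _ _).mpr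
        (h i (Finset.mem_range.mp hi) j (Finset.mem_range.mp hj))
  rw [if_congr hiff rfl rfl]

theorem go_eq (matrix : List (List Int)) (m n : Nat) :
    ∀ fuel size res, fuel + size ≤ min m n + 1 →
      countB_go (buildZ matrix m n) m n fuel size res = countA_go matrix m n fuel size res := by
  intro fuel
  induction fuel with
  | zero => intro size res _; rfl
  | succ fuel ih =>
    intro size res h
    rw [show countB_go (buildZ matrix m n) m n (fuel + 1) size res =
        (if countB_size (buildZ matrix m n) m n size < 4
         then res + countB_size (buildZ matrix m n) m n size
         else countB_go (buildZ matrix m n) m n fuel (size + 1)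
           (res + countB_size (buildZ matrix m n) m n size)) from rfl]
    rw [show countA_go matrix m n (fuel + 1) size res =
        (if countA_size matrix m n size < 4
         then res + countA_size matrix m n size
         else countA_go matrix m n fuel (size + 1)
           (res + countA_size matrix m n size)) from rfl]
    rw [size_eq matrix m n size (by omega) (by omega)]
    split
    · rfl
    · exact ih (size + 1) _ (by omega)

-- ===== VERDICT (by name: the statement is the Claim_ definition above) =====
theorem countSquares_spec : Claim_equal_countSquares := by
  intro matrix _ _
  unfold Spec_countSquares countSquares countSquares_alt
  exact (go_eq matrix _ _ _ 1 0 (by omega)).symm
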